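-- pv_equiv track=rewrite | github.com/jonathanboreljaquet/BJ_STD_TECH2 | BJ_PA_Exercice02/BJ_PA_Exercice02/BJ_PA_Exercice02.py | unsynchsafe
-- ===== SOURCE A (Python) =====
-- def unsynchsafe(num):
--         out = 0
--         mask = 0x7f000000
--         for i in range(4):
--             out >>= 1
--             out |= num & mask
--             mask >>= 8
--         return out
-- ===== SOURCE B (Python) =====
-- def unsynchsafe(num):
--     # Closed-form: extract each septet group and shift it into place.
--     return ((num & 0x7F)
--             | ((num & 0x7F00) >> 1)
--             | ((num & 0x7F0000) >> 2)
--             | ((num & 0x7F000000) >> 3))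
-- ===== Notes on version B (the rewrite author's own statement) =====
-- stated objective: simpler
-- what changed: Replaced the per-byte shift/mask loop with mutable out/mask accumulators by a single closed-form mask-and-shift expression ORing the four septet groups into place.
import Mathlib
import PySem

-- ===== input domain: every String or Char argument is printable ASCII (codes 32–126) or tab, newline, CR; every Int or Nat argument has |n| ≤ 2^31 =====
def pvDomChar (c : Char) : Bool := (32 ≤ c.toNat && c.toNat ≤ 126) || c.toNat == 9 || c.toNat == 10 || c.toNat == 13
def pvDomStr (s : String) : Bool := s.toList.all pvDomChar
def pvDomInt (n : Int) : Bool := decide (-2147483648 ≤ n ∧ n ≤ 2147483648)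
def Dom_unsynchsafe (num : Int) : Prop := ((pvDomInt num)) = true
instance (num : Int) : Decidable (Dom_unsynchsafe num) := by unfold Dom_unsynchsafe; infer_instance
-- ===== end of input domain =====

-- B replaces A's per-byte shift/mask loop by one closed-form mask-and-shift expression (simpler).

-- ===== PORT A =====
-- for i in range(4): out >>= 1; out |= num & mask; mask >>= 8
def unsynchsafe (num : Int) : Int :=
  (((PySem.List.pyRange 0 4 1).foldl
      (fun (s : Int × Int) (_ : Int) =>
        let out := s.1 >>> 1
        let out := PySem.Int.bor out (PySem.Int.band num s.2)
        let mask := s.2 >>> 8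
        (out, mask))
      (0, 0x7f000000))).1

-- ===== PORT B =====
def unsynchsafe_alt (num : Int) : Int :=
  PySem.Int.bor
    (PySem.Int.bor
      (PySem.Int.bor (PySem.Int.band num 0x7F) ((PySem.Int.band num 0x7F00) >>> 1))
      ((PySem.Int.band num 0x7F0000) >>> 2))
    ((PySem.Int.band num 0x7F000000) >>> 3)

-- ===== PRECONDITION & SPEC =====
def Spec_unsynchsafe (num : Int) (out : Int) : Prop := out = unsynchsafe_alt num
instance (num : Int) (out : Int) : Decidable (Spec_unsynchsafe num out) := by unfold Spec_unsynchsafe; infer_instance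

-- ===== CLAIM (what is proved, stated in full; the proofs are below) =====
def Claim_equal_unsynchsafe : Prop := ∀ (num : Int), Dom_unsynchsafe num → Spec_unsynchsafe num (unsynchsafe num)

-- ===== LEMMAS AND PROOFS =====

-- num & M for a nonneg mask M is a nonneg Int, hence a Nat cast
theorem band_mask_eq_natCast (num M : Int) (hM : 0 ≤ M) :
    PySem.Int.band num M = ((PySem.Int.band num M).toNat : Int) := by
  have h : 0 ≤ PySem.Int.band num M := by
    rw [PySem.Int.band_comm]
    exact PySem.Int.band_nonneg_of_nonneg_left num hM
  exact (Int.toNat_of_nonneg h).symm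

-- the core identity, on Nat
theorem nat_core (a0 a1 a2 a3 : Nat) :
    ((((0 >>> 1 ||| a3) >>> 1 ||| a2) >>> 1 ||| a1) >>> 1 ||| a0)
      = ((a0 ||| a1 >>> 1) ||| a2 >>> 2) ||| a3 >>> 3 := by
  apply Nat.eq_of_testBit_eq
  intro i
  simp [Nat.testBit_or, Nat.testBit_shiftRight, Nat.add_comm, Nat.add_left_comm]
  ac_rfl

theorem unsynchsafe_eq (num : Int) : unsynchsafe num = unsynchsafe_alt num := by
  unfold unsynchsafe unsynchsafe_alt
  rw [show PySem.List.pyRange 0 4 1 = [0, 1, 2, 3] from by decide]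
  simp only [List.foldl_cons, List.foldl_nil]
  rw [show (2130706432 : Int) >>> 8 = 8323072 from by decide,
      show (8323072 : Int) >>> 8 = 32512 from by decide,
      show (32512 : Int) >>> 8 = 127 from by decide]
  rw [band_mask_eq_natCast num 0x7F (by norm_num),
      band_mask_eq_natCast num 0x7F00 (by norm_num),
      band_mask_eq_natCast num 0x7F0000 (by norm_num),
      band_mask_eq_natCast num 0x7F000000 (by norm_num)]
  generalize (PySem.Int.band num 0x7F).toNat = a0
  generalize (PySem.Int.band num 0x7F00).toNat = a1
  generalize (PySem.Int.band num 0x7F0000).toNat = a2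
  generalize (PySem.Int.band num 0x7F000000).toNat = a3
  rw [show (0 : Int) = ((0 : Nat) : Int) from rfl]
  simp only [show (1 : Int) = ((1 : Nat) : Int) from rfl,
             show (2 : Int) = ((2 : Nat) : Int) from rfl,
             show (3 : Int) = ((3 : Nat) : Int) from rfl]
  simp only [Int.shiftRight_natCast, PySem.Int.bor_natCast]
  exact congrArg _ (nat_core a0 a1 a2 a3)

-- ===== VERDICT (by name: the statement is the Claim_ definition above) =====
theorem unsynchsafe_spec : Claim_equal_unsynchsafe := by
  intro num _
  exact unsynchsafe_eq num
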